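-- pv_equiv track=rewrite | github.com/Aramushaa/LingoDojo | bot/tools/datasets/tatoeba_airport_to_csv.py | pick_best_english
-- ===== SOURCE A (Python) =====
-- from typing import Dict, List, Tuple, Optional
--
-- def pick_best_english(
--     eng_ids: List[int],
--     sentences: Dict[int, Tuple[str, str]]
-- ) -> Optional[str]:
--     # MVP heuristic: pick the shortest English translation (usually cleaner)
--     best = None
--     for eid in eng_ids:
--         text = sentences.get(eid, ("", ""))[1]
--         if not text:
--             continue
--         if best is None or len(text) < len(best):
--             best = text
--     return best
-- ===== SOURCE B (Python) =====
-- from typing import Dict, List, Tuple, Optional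
--
-- def pick_best_english(
--     eng_ids: List[int],
--     sentences: Dict[int, Tuple[str, str]]
-- ) -> Optional[str]:
--     # Collect the non-empty English texts, then take the front of a stable
--     # length-sort: among equal-length texts the first-encountered one wins,
--     # exactly as the incremental strict-< minimum does.
--     texts = [t for t in (sentences.get(eid, ("", ""))[1] for eid in eng_ids) if t]
--     if not texts:
--         return None
--     return sorted(texts, key=len)[0]
-- ===== Notes on version B (the rewrite author's own statement) =====
-- stated objective: alternative
-- what changed: Replaces A's single-pass incremental strict-less minimum (with None sentinel state) by building the list of non-empty translations and taking the head of a stable sort by length, relying on sort stability for the first-wins tie-break.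
import Mathlib
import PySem

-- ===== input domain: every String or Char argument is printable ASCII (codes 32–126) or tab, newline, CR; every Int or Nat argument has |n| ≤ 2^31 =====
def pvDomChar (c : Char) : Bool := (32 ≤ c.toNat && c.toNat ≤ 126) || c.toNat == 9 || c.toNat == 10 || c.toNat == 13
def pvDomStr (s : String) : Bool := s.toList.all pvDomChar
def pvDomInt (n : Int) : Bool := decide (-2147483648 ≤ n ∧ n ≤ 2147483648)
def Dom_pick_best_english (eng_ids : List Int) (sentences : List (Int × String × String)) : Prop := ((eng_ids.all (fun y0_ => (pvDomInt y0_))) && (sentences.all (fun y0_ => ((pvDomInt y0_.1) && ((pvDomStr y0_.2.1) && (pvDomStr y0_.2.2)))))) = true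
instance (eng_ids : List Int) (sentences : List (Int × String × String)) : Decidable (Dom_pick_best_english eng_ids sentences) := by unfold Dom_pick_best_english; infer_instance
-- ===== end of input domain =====

-- B replaces A's single-pass strict-< minimum by filter + stable sort-by-length + head (same result; alternative decomposition).


-- ===== PORT A =====
-- A: for-loop keeping the running shortest non-empty translation (best : Option String).
def pick_best_english (eng_ids : List Int) (sentences : List (Int × String × String)) : Option String :=
  eng_ids.foldl (fun best eid =>
    let text := ((PySem.Dict.mk sentences).getD eid ("", "")).2
    if text = "" then best
    else match best with
      | none => some text
      | some b => if PySem.Str.len text < PySem.Str.len b then some text else best) none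

-- ===== PORT B =====
-- B: list of non-empty texts; None if empty; else head of the stable sort by length
-- (sorted(texts, key=len)[0]: texts is non-empty there, so head? is exactly the [0] access).
def pick_best_english_alt (eng_ids : List Int) (sentences : List (Int × String × String)) : Option String :=
  let texts := (eng_ids.map (fun eid => ((PySem.Dict.mk sentences).getD eid ("", "")).2)).filter (fun t => t != "")
  if texts.isEmpty then none
  else (PySem.List.sorted texts (fun t => PySem.Str.len t) false).head?

-- ===== PRECONDITION & SPEC =====
def Spec_pick_best_english (eng_ids : List Int) (sentences : List (Int × String × String)) (out : Option String) : Prop := out = pick_best_english_alt eng_ids sentences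
instance (eng_ids : List Int) (sentences : List (Int × String × String)) (out : Option String) : Decidable (Spec_pick_best_english eng_ids sentences out) := by unfold Spec_pick_best_english; infer_instance

-- ===== CLAIM (what is proved, stated in full; the proofs are below) =====
def Claim_equal_pick_best_english : Prop := ∀ (eng_ids : List Int) (sentences : List (Int × String × String)), Dom_pick_best_english eng_ids sentences → Spec_pick_best_english eng_ids sentences (pick_best_english eng_ids sentences)

-- ===== LEMMAS AND PROOFS =====

-- A's loop over the ids equals the min-fold over the filtered list of non-empty texts.
lemma loopA_eq_filter (f : Int → String) (ids : List Int) (best : Option String) :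
    ids.foldl (fun best eid =>
      let text := f eid
      if text = "" then best
      else match best with
        | none => some text
        | some b => if PySem.Str.len text < PySem.Str.len b then some text else best) best
    = ((ids.map f).filter (fun t => t != "")).foldl (fun best t =>
        match best with
        | none => some t
        | some b => if PySem.Str.len t < PySem.Str.len b then some t else best) best := by
  induction ids generalizing best with
  | nil => rfl
  | cons i tl ih =>
    simp only [List.foldl_cons, List.map_cons, List.filter_cons]
    by_cases h : f i = ""
    · simp only [h]
      simpa using ih best
    · simpa [h] using ih _

-- The head of the stable sort by length is the first strict-< minimum of the list.
lemma head_sorted_eq_fmin (L : List String) :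
    (PySem.List.sorted L (fun t => PySem.Str.len t) false).head? =
    L.foldl (fun best t =>
        match best with
        | none => some t
        | some b => if PySem.Str.len t < PySem.Str.len b then some t else best) none := by
  induction L using List.reverseRecOn with
  | nil => rfl
  | append_singleton L x ih =>
    have hs : PySem.List.sorted (L ++ [x]) (fun t => PySem.Str.len t) false
        = PySem.List.insertBy (fun a b => decide (PySem.Str.len a < PySem.Str.len b)) x
            (PySem.List.sorted L (fun t => PySem.Str.len t) false) := by
      rw [PySem.List.sorted_eq_foldl_insertBy, PySem.List.sorted_eq_foldl_insertBy,
        List.foldl_append]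
      rfl
    rw [List.foldl_append, ← ih, hs]
    cases hL : PySem.List.sorted L (fun t => PySem.Str.len t) false with
    | nil => simp [PySem.List.insertBy]
    | cons y t =>
      by_cases hxy : x.length < y.length
      · simp [PySem.List.insertBy, PySem.Str.len, hxy]
      · simp [PySem.List.insertBy, PySem.Str.len, hxy]

-- ===== VERDICT (by name: the statement is the Claim_ definition above) =====
theorem pick_best_english_spec : Claim_equal_pick_best_english := by
  intro eng_ids sentences _
  unfold Spec_pick_best_english pick_best_english pick_best_english_alt
  rw [loopA_eq_filter, ← head_sorted_eq_fmin]
  by_cases h :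
      ((eng_ids.map (fun eid => ((PySem.Dict.mk sentences).getD eid ("", "")).2)).filter
        (fun t => t != "")) = []
  · simp [h, PySem.List.sorted]
  · simp [h]
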